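-- pv_equiv track=rewrite | github.com/ywcheong/solved-baekjoon | solve/25194.py | solve
-- ===== SOURCE A (Python) =====
-- def solve(N: int, given_days: list[int]) -> bool:
--     """
--     :param N: 일의 개수 (1 <= N <= 1,000)
--     :param given_days: 각 일의 작업 소요 시간 리스트 (1 <= A_i <= 10^5)
--     :return: 금요일에 마칠 수 있으면 True, 없으면 False
--     """
--     # IMPLEMENT HERE: 여기에 핵심 로직을 작성하세요.
--     possible_days = [False] * 7
--     for day in given_days:
--         new_day = day % 7
--         new_possible_days = possible_days[:] # GC 최적화된 코드는 아님
--         for each_day in range(7):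
--             if possible_days[each_day]:
--                 new_possible_days[(each_day + new_day) % 7] = True
--         new_possible_days[new_day] = True
--         possible_days = new_possible_days
--
--     return possible_days[4]
-- ===== SOURCE B (Python) =====
-- def solve(N: int, given_days: list[int]) -> bool:
--     # Collect nonzero residues mod 7; six of them already guarantee every
--     # residue is a reachable subset sum (the reachable set, which contains 0,
--     # grows by at least one residue per nonzero element until it is all of
--     # Z/7), so we can stop scanning early. Otherwise at most 5 residues
--     # remain and we brute-force their (at most 31) nonempty subsets.
--     nz = []
--     for d in given_days:
--         r = d % 7
--         if r:
--             nz.append(r)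
--             if len(nz) == 6:
--                 return True
--     for m in range(1, 1 << len(nz)):
--         s = 0
--         for i, r in enumerate(nz):
--             if (m >> i) & 1:
--                 s += r
--         if s % 7 == 4:
--             return True
--     return False
-- ===== Notes on version B (the rewrite author's own statement) =====
-- stated objective: alternative
-- what changed: A runs a 7-state reachability DP over every day; B instead collects nonzero residues mod 7, returns True immediately once six of them are seen (six nonzero residues provably make every residue a reachable subset sum), and otherwise brute-forces the at most 31 nonempty subsets of the at most 5 remaining residues.
import Mathlib
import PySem

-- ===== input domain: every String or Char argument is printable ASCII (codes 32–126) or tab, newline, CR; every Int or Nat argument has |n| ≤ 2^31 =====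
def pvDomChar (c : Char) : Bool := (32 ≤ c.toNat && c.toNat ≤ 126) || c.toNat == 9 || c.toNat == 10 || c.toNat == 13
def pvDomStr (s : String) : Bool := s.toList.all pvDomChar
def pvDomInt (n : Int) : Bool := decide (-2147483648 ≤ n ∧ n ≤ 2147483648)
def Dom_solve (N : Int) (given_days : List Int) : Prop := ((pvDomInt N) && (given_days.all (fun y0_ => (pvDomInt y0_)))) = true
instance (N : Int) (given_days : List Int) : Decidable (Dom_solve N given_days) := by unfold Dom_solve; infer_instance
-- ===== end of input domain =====

-- B replaces A's per-day 7-state reachability DP by: stop as soon as six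
-- nonzero residues mod 7 are seen (then every residue is reachable), else
-- brute-force the ≤ 31 nonempty subsets of the ≤ 5 residues (objective: alternative).

-- ===== PORT A =====
-- one iteration of A's outer loop (indices are provably in range, so
-- pyGet?.getD false is exact for possible_days[each_day])
def solveStepA (pd : List Bool) (day : Int) : List Bool :=
  let new_day := PySem.Int.mod day 7
  let npd := (PySem.List.pyRange 0 7 1).foldl
    (fun npd each_day =>
      if (PySem.List.pyGet? pd each_day).getD false then
        npd.set (PySem.Int.mod (each_day + new_day) 7).toNat true
      else npd)
    (PySem.List.slice pd none none)   -- possible_days[:]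
  npd.set new_day.toNat true

def solve (N : Int) (given_days : List Int) : Bool :=
  let pd := given_days.foldl solveStepA (List.replicate 7 false)
  (PySem.List.pyGet? pd 4).getD false

-- ===== PORT B =====
-- s += r for the indices i of nz with bit i of m set (Python's enumerate loop;
-- indices and masks are nonnegative, so Nat arithmetic is exact)
def solveBSum (nz : List Nat) (m : Nat) : Nat :=
  (PySem.List.enumerate nz 0).foldl
    (fun s p => if (m >>> p.1.toNat) &&& 1 = 1 then s + p.2 else s) 0

-- Source B's first loop: collect nonzero residues, `none` = early `return True`
def solveBLoop : List Int → List Nat → Option (List Nat)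
  | [], nz => some nz
  | d :: rest, nz =>
      let r := (PySem.Int.mod d 7).toNat
      if r ≠ 0 then
        let nz' := nz ++ [r]
        if nz'.length = 6 then none else solveBLoop rest nz'
      else solveBLoop rest nz

-- range(1, 1 << len(nz)) ported as (List.range (1 <<< len)).drop 1 (exact: masks ≥ 0)
def solve_alt (N : Int) (given_days : List Int) : Bool :=
  match solveBLoop given_days [] with
  | none => true
  | some nz => ((List.range (1 <<< nz.length)).drop 1).any
      (fun m => solveBSum nz m % 7 == 4)

-- ===== PRECONDITION & SPEC =====
def Spec_solve (N : Int) (given_days : List Int) (out : Bool) : Prop := out = solve_alt N given_days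
instance (N : Int) (given_days : List Int) (out : Bool) : Decidable (Spec_solve N given_days out) := by unfold Spec_solve; infer_instance

-- ===== CLAIM (what is proved, stated in full; the proofs are below) =====
def Claim_equal_solve : Prop := ∀ (N : Int) (given_days : List Int), Dom_solve N given_days → Spec_solve N given_days (solve N given_days)

-- ===== LEMMAS AND PROOFS =====

-- ---- proof-side machinery ----
-- A's list of 7 booleans, read off a 7-bit mask
def pvDecode (m : Nat) : List Bool :=
  [m.testBit 0, m.testBit 1, m.testBit 2, m.testBit 3, m.testBit 4, m.testBit 5, m.testBit 6]

-- A's step on the mask encoding (no empty-subset bit)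
def pvStepB (mask : Nat) (day : Int) : Nat :=
  let d := (PySem.Int.mod day 7).toNat
  let rot := ((mask <<< d) ||| (mask >>> (7 - d))) &&& 0x7F
  mask ||| rot ||| (1 <<< d)

-- residue of a day
def pvRes (day : Int) : Nat := (PySem.Int.mod day 7).toNat

-- reference step: reachable-set mask (contains bit 0 = empty subset), residue d
def pvStep (m d : Nat) : Nat := m ||| (((m <<< d) ||| (m >>> (7 - d))) &&& 0x7F)

-- the nonzero residues of the input
def pvNz (l : List Int) : List Nat := (l.map pvRes).filter (· ≠ 0)

-- popcount of a 7-bit mask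
def pvPop (m : Nat) : Nat := ((List.range 7).filter (m.testBit ·)).length

-- "some subset of l sums to j mod 7" (j < 7, elements < 7)
def pvReach : List Nat → Nat → Bool
  | [], j => j == 0
  | r :: l, j => pvReach l j || pvReach l ((j + 7 - r) % 7)

-- bit-indexed subset sum
def pvSumBits : List Nat → Nat → Nat
  | [], _ => 0
  | r :: l, m => (if m &&& 1 = 1 then r else 0) + pvSumBits l (m >>> 1)

-- ---- part 1: A equals bit 4 of the pvStepB fold (as in a mask DP) ----
theorem pvMod7_idem (day : Int) :
    PySem.Int.mod (PySem.Int.mod day 7) 7 = PySem.Int.mod day 7 := by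
  rw [PySem.Int.mod_eq_emod_of_pos (by norm_num : (0:Int) < 7),
      PySem.Int.mod_eq_emod_of_pos (by norm_num : (0:Int) < 7)]
  exact Int.emod_emod_of_dvd day (by norm_num)

theorem stepA_mod (pd : List Bool) (day : Int) :
    solveStepA pd day = solveStepA pd (PySem.Int.mod day 7) := by
  unfold solveStepA; rw [pvMod7_idem]

theorem stepB_mod (m : Nat) (day : Int) :
    pvStepB m day = pvStepB m (PySem.Int.mod day 7) := by
  unfold pvStepB; rw [pvMod7_idem]

theorem step_key : ∀ m < 128, ∀ d < 7,
    solveStepA (pvDecode m) (Int.ofNat d) = pvDecode (pvStepB m (Int.ofNat d)) ∧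
    pvStepB m (Int.ofNat d) < 128 := by decide

theorem res_lt (day : Int) : pvRes day < 7 := by
  have h0 : (0:Int) < 7 := by norm_num
  have := PySem.Int.mod_lt day h0
  have := PySem.Int.mod_nonneg day h0
  unfold pvRes; omega

theorem res_cast (day : Int) : PySem.Int.mod day 7 = Int.ofNat (pvRes day) := by
  have h := PySem.Int.mod_nonneg day (by norm_num : (0:Int) < 7)
  unfold pvRes
  exact_mod_cast (Int.toNat_of_nonneg h).symm

theorem step_corr (m : Nat) (hm : m < 128) (day : Int) :
    solveStepA (pvDecode m) day = pvDecode (pvStepB m day) ∧ pvStepB m day < 128 := by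
  have key := step_key m hm (pvRes day) (res_lt day)
  rw [stepA_mod, stepB_mod, res_cast]
  exact key

theorem fold_inv : ∀ (l : List Int) (m : Nat), m < 128 →
    l.foldl solveStepA (pvDecode m) = pvDecode (l.foldl pvStepB m) ∧
    l.foldl pvStepB m < 128 := by
  intro l
  induction l with
  | nil => intro m hm; exact ⟨rfl, hm⟩
  | cons day rest ih =>
      intro m hm
      obtain ⟨heq, hlt⟩ := step_corr m hm day
      simpa [List.foldl, heq] using ih (pvStepB m day) hlt

theorem final_key : ∀ m < 128,
    ((PySem.List.pyGet? (pvDecode m) 4).getD false) = m.testBit 4 := by decide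

theorem solve_eq_mask (N : Int) (l : List Int) :
    solve N l = (l.foldl pvStepB 0).testBit 4 := by
  unfold solve
  have hinit : List.replicate 7 false = pvDecode 0 := by decide
  obtain ⟨heq, hlt⟩ := fold_inv l 0 (by norm_num)
  rw [hinit, heq]
  exact final_key _ hlt

-- ---- part 2: pvStepB fold with bit 0 adjoined is the reference fold ----
theorem stepB_or_one : ∀ m < 128, ∀ d < 7,
    pvStepB m (Int.ofNat d) ||| 1 = pvStep (m ||| 1) d ∧ pvStep (m ||| 1) d < 128 := by
  decide

theorem stepB_or_one' (m : Nat) (hm : m < 128) (day : Int) :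
    pvStepB m day ||| 1 = pvStep (m ||| 1) (pvRes day) ∧ pvStep (m ||| 1) (pvRes day) < 128 := by
  rw [stepB_mod, res_cast]
  exact stepB_or_one m hm (pvRes day) (res_lt day)

theorem foldB_or_one : ∀ (l : List Int) (m : Nat), m < 128 →
    (l.foldl pvStepB m) ||| 1 = l.foldl (fun m day => pvStep m (pvRes day)) (m ||| 1) ∧
    l.foldl (fun m day => pvStep m (pvRes day)) (m ||| 1) < 128 := by
  intro l
  induction l with
  | nil =>
      intro m hm
      refine ⟨rfl, ?_⟩
      have h128 : (128 : Nat) = 2 ^ 7 := by norm_num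
      rw [h128] at hm ⊢
      exact Nat.or_lt_two_pow hm (by norm_num)
  | cons day rest ih =>
      intro m hm
      obtain ⟨heq, hlt⟩ := stepB_or_one' m hm day
      have hBlt : pvStepB m day < 128 := (step_corr m hm day).2
      obtain ⟨ih1, ih2⟩ := ih (pvStepB m day) hBlt
      constructor
      · simpa [List.foldl, heq] using ih1
      · simpa [List.foldl, heq] using ih2

theorem testBit4_or_one (m : Nat) : (m ||| 1).testBit 4 = m.testBit 4 := by
  have h1 : Nat.testBit 1 4 = false := by decide
  simp [Nat.testBit_or, h1]

-- ---- part 3: zero residues are identity; reference fold runs over pvNz ----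
theorem step_lt : ∀ m < 128, ∀ d < 7, pvStep m d < 128 := by decide

theorem step_zero : ∀ m < 128, pvStep m 0 = m := by decide

theorem fold_filter : ∀ (l : List Int) (m : Nat), m < 128 →
    l.foldl (fun m day => pvStep m (pvRes day)) m = (pvNz l).foldl pvStep m := by
  intro l
  induction l with
  | nil => intro m _; rfl
  | cons day rest ih =>
      intro m hm
      by_cases h : pvRes day = 0
      · have hnz : pvNz (day :: rest) = pvNz rest := by simp [pvNz, h]
        simp only [List.foldl_cons]
        rw [h, step_zero m hm, hnz, ih m hm]
      · have hlt : pvStep m (pvRes day) < 128 := step_lt m hm _ (res_lt day)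
        have hnz : pvNz (day :: rest) = pvRes day :: pvNz rest := by simp [pvNz, h]
        simp only [List.foldl_cons]
        rw [hnz, List.foldl_cons]
        exact ih (pvStep m (pvRes day)) hlt

theorem nz_mem (l : List Int) : ∀ r ∈ pvNz l, 1 ≤ r ∧ r < 7 := by
  intro r hr
  unfold pvNz at hr
  simp only [List.mem_filter, List.mem_map] at hr
  obtain ⟨⟨day, _, rfl⟩, hne⟩ := hr
  have := res_lt day
  simp at hne
  omega

-- ---- part 4: growth — six nonzero residues reach everything ----
theorem growth_key : ∀ m < 128, m.testBit 0 = true → ∀ d, 1 ≤ d → d < 7 →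
    pvStep m d < 128 ∧ (pvStep m d).testBit 0 = true ∧
    (if m = 127 then pvStep m d = 127 else pvPop m + 1 ≤ pvPop (pvStep m d)) ∧
    pvPop m ≤ pvPop (pvStep m d) := by decide

theorem pop_le : ∀ m < 128, pvPop m ≤ 7 := by decide
theorem pop_full : ∀ m < 128, 7 ≤ pvPop m → m = 127 := by decide

theorem fold_127 : ∀ (nz : List Nat), (∀ r ∈ nz, 1 ≤ r ∧ r < 7) →
    nz.foldl pvStep 127 = 127 := by
  intro nz
  induction nz with
  | nil => intro _; rfl
  | cons r l ih =>
      intro h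
      obtain ⟨h1, h2⟩ := h r (by simp)
      have hst := (growth_key 127 (by norm_num) (by decide) r h1 h2).2.2.1
      rw [if_pos rfl] at hst
      rw [List.foldl_cons, hst]
      exact ih (fun x hx => h x (by simp [hx]))

theorem growth_aux : ∀ (nz : List Nat) (m : Nat), (∀ r ∈ nz, 1 ≤ r ∧ r < 7) →
    m < 128 → m.testBit 0 = true →
    nz.foldl pvStep m < 128 ∧
    (nz.foldl pvStep m = 127 ∨ pvPop m + nz.length ≤ pvPop (nz.foldl pvStep m)) := by
  intro nz
  induction nz with
  | nil => intro m hall hm hb; exact ⟨hm, Or.inr (by simp)⟩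
  | cons r l ih =>
      intro m hall hm hb
      obtain ⟨h1, h2⟩ := hall r (by simp)
      obtain ⟨glt, gb, gif, gmono⟩ := growth_key m hm hb r h1 h2
      obtain ⟨flt, fcase⟩ := ih (pvStep m r) (fun x hx => hall x (by simp [hx])) glt gb
      refine ⟨by simpa [List.foldl] using flt, ?_⟩
      by_cases hm127 : m = 127
      · subst hm127
        simp at gif
        left
        simpa [List.foldl, gif] using fold_127 l (fun x hx => hall x (by simp [hx]))
      · simp [hm127] at gif
        rcases fcase with h | h
        · left; simpa [List.foldl] using h
        · right
          simp only [List.foldl_cons, List.length_cons]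
          omega

theorem growth (nz : List Nat) (hall : ∀ r ∈ nz, 1 ≤ r ∧ r < 7) (hlen : 6 ≤ nz.length) :
    (nz.foldl pvStep 1).testBit 4 = true := by
  obtain ⟨hlt, hcase⟩ := growth_aux nz 1 hall (by norm_num) (by decide)
  have h127 : nz.foldl pvStep 1 = 127 := by
    rcases hcase with h | h
    · exact h
    · have hle := pop_le _ hlt
      have : pvPop 1 = 1 := by decide
      exact pop_full _ hlt (by omega)
  rw [h127]; decide

-- ---- part 5: bit j of the reference fold ↔ pvReach ----
theorem stepT : ∀ m < 128, ∀ r < 7, ∀ k < 7,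
    (pvStep m r).testBit k = (m.testBit k || m.testBit ((k + 7 - r) % 7)) := by decide

theorem char : ∀ (nz : List Nat) (m j : Nat), (∀ r ∈ nz, r < 7) → m < 128 → j < 7 →
    ((nz.foldl pvStep m).testBit j = true ↔
      ∃ k, k < 7 ∧ m.testBit k = true ∧ pvReach nz ((j + 7 - k) % 7) = true) := by
  intro nz
  induction nz with
  | nil =>
      intro m j _ hm hj
      simp only [List.foldl_nil, pvReach]
      constructor
      · intro h
        exact ⟨j, hj, h, by simp only [beq_iff_eq]; omega⟩
      · rintro ⟨k, hk, hb, hr⟩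
        simp at hr
        have : k = j := by omega
        rwa [this] at hb
  | cons r l ih =>
      intro m j hall hm hj
      have hr7 : r < 7 := hall r (by simp)
      have hlt : pvStep m r < 128 := step_lt m hm r hr7
      rw [List.foldl_cons, ih (pvStep m r) j (fun x hx => hall x (by simp [hx])) hlt hj]
      constructor
      · rintro ⟨k, hk, hb, hre⟩
        rw [stepT m hm r hr7 k hk] at hb
        simp only [Bool.or_eq_true] at hb
        rcases hb with hb | hb
        · exact ⟨k, hk, hb, by simp [pvReach, hre]⟩
        · refine ⟨(k + 7 - r) % 7, by omega, hb, ?_⟩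
          simp only [pvReach, Bool.or_eq_true]
          right
          have : ((j + 7 - (k + 7 - r) % 7) % 7 + 7 - r) % 7 = (j + 7 - k) % 7 := by omega
          rwa [this]
      · rintro ⟨k, hk, hb, hre⟩
        simp only [pvReach, Bool.or_eq_true] at hre
        rcases hre with hre | hre
        · refine ⟨k, hk, ?_, hre⟩
          rw [stepT m hm r hr7 k hk]; simp [hb]
        · refine ⟨(k + r) % 7, by omega, ?_, ?_⟩
          · rw [stepT m hm r hr7 _ (by omega)]
            have : ((k + r) % 7 + 7 - r) % 7 = k := by omega
            rw [this]; simp [hb]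
          · have : (j + 7 - (k + r) % 7) % 7 = ((j + 7 - k) % 7 + 7 - r) % 7 := by omega
            rwa [this]

theorem char_one (nz : List Nat) (hall : ∀ r ∈ nz, r < 7) :
    ((nz.foldl pvStep 1).testBit 4 = true ↔ pvReach nz 4 = true) := by
  rw [char nz 1 4 hall (by norm_num) (by norm_num)]
  constructor
  · rintro ⟨k, hk, hb, hre⟩
    have : k = 0 := by
      rcases Nat.eq_zero_or_pos k with h | h
      · exact h
      · exfalso
        have : (1 : Nat).testBit k = false := by
          simpa using Nat.testBit_two_pow_of_ne (n := 0) (m := k) (by omega)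
        simp [this] at hb
    subst this
    simpa using hre
  · intro h
    exact ⟨0, by norm_num, by decide, by simpa using h⟩

-- ---- part 6: the brute-force loop of B computes pvReach nz 4 ----
theorem sumBits_zero : ∀ (nz : List Nat), pvSumBits nz 0 = 0 := by
  intro nz
  induction nz with
  | nil => rfl
  | cons r l ihh => simp [pvSumBits, ihh]

theorem sumBits_fold : ∀ (nz : List Nat) (s m acc : Nat),
    (PySem.List.enumerate nz (s : Int)).foldl
      (fun a p => if (m >>> p.1.toNat) &&& 1 = 1 then a + p.2 else a) acc
    = acc + pvSumBits nz (m >>> s) := by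
  intro nz
  induction nz with
  | nil => intro s m acc; simp [PySem.List.enumerate_nil, pvSumBits]
  | cons r l ih =>
      intro s m acc
      rw [PySem.List.enumerate_cons]
      simp only [List.foldl_cons]
      have hcast : ((s : Int) + 1) = ((s + 1 : Nat) : Int) := by push_cast; ring
      rw [hcast, ih (s + 1) m]
      have hsh : m >>> (s + 1) = (m >>> s) >>> 1 := by
        rw [Nat.shiftRight_add]
      rw [hsh]
      simp only [Int.toNat_natCast, pvSumBits]
      split_ifs with h <;> omega

theorem solveBSum_eq (nz : List Nat) (m : Nat) : solveBSum nz m = pvSumBits nz m := by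
  unfold solveBSum
  have := sumBits_fold nz 0 m 0
  simpa using this

theorem reach_iff_sum : ∀ (nz : List Nat) (j : Nat), (∀ r ∈ nz, r < 7) → j < 7 →
    (pvReach nz j = true ↔ ∃ m, m < 2 ^ nz.length ∧ pvSumBits nz m % 7 = j) := by
  intro nz
  induction nz with
  | nil =>
      intro j _ hj
      simp only [pvReach, List.length_nil, pow_zero, beq_iff_eq]
      constructor
      · intro h; exact ⟨0, by omega, by simp [pvSumBits]; omega⟩
      · rintro ⟨m, hm, hs⟩
        have : m = 0 := by omega
        subst this
        simp [pvSumBits] at hs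
        omega
  | cons r l ih =>
      intro j hall hj
      have hr7 : r < 7 := hall r (by simp)
      have hall' : ∀ x ∈ l, x < 7 := fun x hx => hall x (by simp [hx])
      simp only [pvReach, Bool.or_eq_true, List.length_cons]
      rw [ih j hall' hj, ih ((j + 7 - r) % 7) hall' (by omega)]
      constructor
      · rintro (⟨m, hm, hs⟩ | ⟨m, hm, hs⟩)
        · refine ⟨2 * m, by omega, ?_⟩
          have h1 : (2 * m) &&& 1 = 0 := by rw [Nat.and_one_is_mod]; omega
          have h2 : (2 * m) >>> 1 = m := by rw [Nat.shiftRight_one]; omega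
          simp [pvSumBits, h1, h2, hs]
        · refine ⟨2 * m + 1, by omega, ?_⟩
          have h1 : (2 * m + 1) &&& 1 = 1 := by rw [Nat.and_one_is_mod]; omega
          have h2 : (2 * m + 1) >>> 1 = m := by rw [Nat.shiftRight_one]; omega
          simp [pvSumBits, h1, h2]
          omega
      · rintro ⟨m, hm, hs⟩
        have hand : m &&& 1 = m % 2 := Nat.and_one_is_mod m
        have hsh : m >>> 1 = m / 2 := Nat.shiftRight_one m
        by_cases hpar : m % 2 = 1
        · right
          refine ⟨m / 2, by omega, ?_⟩
          simp [pvSumBits, hand, hsh, hpar] at hs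
          omega
        · left
          refine ⟨m / 2, by omega, ?_⟩
          simp [pvSumBits, hand, hsh, hpar] at hs
          simpa using hs

theorem brute_eq_reach (nz : List Nat) (hall : ∀ r ∈ nz, r < 7) :
    ((List.range (1 <<< nz.length)).drop 1).any (fun m => solveBSum nz m % 7 == 4)
      = pvReach nz 4 := by
  have hmem : ∀ m : Nat, m ∈ (List.range (1 <<< nz.length)).drop 1 ↔
      1 ≤ m ∧ m < 2 ^ nz.length := by
    intro m
    have hsh : (1 : Nat) <<< nz.length = 2 ^ nz.length := Nat.one_shiftLeft _
    have hp : 1 ≤ 2 ^ nz.length := Nat.one_le_two_pow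
    rw [List.range_eq_range', List.drop_range', List.mem_range'_1, hsh]
    omega
  rw [eq_comm]
  by_cases h : pvReach nz 4 = true
  · rw [h, eq_comm, List.any_eq_true]
    obtain ⟨m, hm, hs⟩ := (reach_iff_sum nz 4 hall (by norm_num)).mp h
    have hm1 : 1 ≤ m := by
      by_contra hc
      have hz : m = 0 := by omega
      subst hz
      have := sumBits_zero nz
      omega
    exact ⟨m, (hmem m).mpr ⟨hm1, hm⟩, by simp [solveBSum_eq, hs]⟩
  · rw [Bool.not_eq_true] at h
    rw [h, eq_comm, List.any_eq_false]
    intro m hmm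
    obtain ⟨hm1, hm2⟩ := (hmem m).mp hmm
    simp only [solveBSum_eq, beq_iff_eq]
    intro hs
    have := (reach_iff_sum nz 4 hall (by norm_num)).mpr ⟨m, hm2, hs⟩
    rw [h] at this
    exact absurd this (by simp)

-- ---- part 7: the collecting loop of B ----
theorem bloop_char : ∀ (l : List Int) (nz : List Nat), nz.length < 6 →
    solveBLoop l nz = if 6 ≤ nz.length + (pvNz l).length then none
                      else some (nz ++ pvNz l) := by
  intro l
  induction l with
  | nil =>
      intro nz h
      have hnil : pvNz ([] : List Int) = [] := rfl
      rw [hnil, if_neg (by simp; omega)]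
      simp [solveBLoop]
  | cons d rest ih =>
      intro nz h
      have hfc : pvNz (d :: rest) =
          if pvRes d = 0 then pvNz rest else pvRes d :: pvNz rest := by
        unfold pvNz
        rw [List.map_cons, List.filter_cons]
        by_cases hr : pvRes d = 0 <;> simp [hr]
      have hstep : solveBLoop (d :: rest) nz =
          (if pvRes d ≠ 0 then
            (if (nz ++ [pvRes d]).length = 6 then none
             else solveBLoop rest (nz ++ [pvRes d]))
           else solveBLoop rest nz) := rfl
      rw [hstep]
      by_cases hr : pvRes d = 0
      · rw [if_neg (by simp [hr]), hfc, if_pos hr]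
        exact ih nz h
      · rw [if_pos hr, hfc, if_neg hr]
        by_cases h6 : (nz ++ [pvRes d]).length = 6
        · rw [if_pos h6, if_pos (by simp at h6 ⊢; omega)]
        · rw [if_neg h6, ih _ (by simp at h6 ⊢; omega)]
          have heq : nz ++ [pvRes d] ++ pvNz rest = nz ++ (pvRes d :: pvNz rest) := by simp
          refine if_congr (by simp; omega) rfl (by rw [heq])

-- ---- final assembly ----
theorem pvSolve_eq (N : Int) (l : List Int) : solve N l = solve_alt N l := by
  rw [solve_eq_mask N l]
  have hA : (l.foldl pvStepB 0).testBit 4 = ((pvNz l).foldl pvStep 1).testBit 4 := by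
    obtain ⟨h1, h2⟩ := foldB_or_one l 0 (by norm_num)
    have h01 : (0 : Nat) ||| 1 = 1 := rfl
    rw [h01] at h1
    rw [← testBit4_or_one (l.foldl pvStepB 0), h1]
    rw [fold_filter l 1 (by norm_num)]
  rw [hA]
  unfold solve_alt
  rw [bloop_char l [] (by norm_num)]
  have hall := nz_mem l
  by_cases h6 : 6 ≤ ([] ++ pvNz l : List Nat).length
  · rw [if_pos (by simpa using h6)]
    simp only []
    exact growth (pvNz l) hall (by simpa using h6)
  · rw [if_neg (by simpa using h6)]
    simp only [List.nil_append]
    rw [brute_eq_reach (pvNz l) (fun r hr => (hall r hr).2)]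
    have := char_one (pvNz l) (fun r hr => (hall r hr).2)
    by_cases hb : pvReach (pvNz l) 4 = true
    · rw [hb, this.mpr hb]
    · have hb' : pvReach (pvNz l) 4 = false := by simpa using hb
      rw [hb']
      by_cases hc : ((pvNz l).foldl pvStep 1).testBit 4 = true
      · exact absurd (this.mp hc) hb
      · simpa using hc

-- ===== VERDICT (by name: the statement is the Claim_ definition above) =====
theorem solve_spec : Claim_equal_solve := by
  intro N given_days _
  unfold Spec_solve
  exact pvSolve_eq N given_days
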